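-- pv_equiv track=rewrite | github.com/ChazzCoin/FairWeb | Futils/URL.py | extract_siteName_two_periods
-- ===== SOURCE A (Python) =====
-- def extract_siteName_two_periods(url):
--     """ PRIVATE """
--     temp = ""
--     start = 0
--     end = 0
--     i = 0
--     periodCount = 0
--     lastChar = ''
--     # -> Part 1
--     for char in url:
--         if char == '/' and lastChar == '/':
--             start = i+1
--         if char == '.':
--             periodCount += 1
--             if periodCount == 2:
--                 end = i
--         if end > 0:
--             temp = url[start:end]
--             break
--         lastChar = char
--         i += 1
--     # -> Part 2
--     n = 0
--     match = ""
--     for c in temp: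
--         if c == '.':
--             match = temp[n+1:]
--         n += 1
--     return match
-- ===== SOURCE B (Python) =====
-- def extract_siteName_two_periods(url):
--     first = url.find('.')
--     if first == -1:
--         return ''
--     end = url.find('.', first + 1)
--     if end == -1:
--         return ''
--     j = url.rfind('//', 0, end)
--     start = 0 if j == -1 else j + 2
--     return url[first + 1:end] if start <= first else ''
-- ===== Notes on version B (the rewrite author's own statement) =====
-- stated objective: faster
-- what changed: Replaced A's character-by-character state machine (periodCount/lastChar/start bookkeeping with an early break, followed by a second scan of temp for its last period) by direct index computations: two str.find calls locate the second period, one str.rfind bounded by that index locates the start after the last double slash, and a single guarded slice is returned.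
import Mathlib
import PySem

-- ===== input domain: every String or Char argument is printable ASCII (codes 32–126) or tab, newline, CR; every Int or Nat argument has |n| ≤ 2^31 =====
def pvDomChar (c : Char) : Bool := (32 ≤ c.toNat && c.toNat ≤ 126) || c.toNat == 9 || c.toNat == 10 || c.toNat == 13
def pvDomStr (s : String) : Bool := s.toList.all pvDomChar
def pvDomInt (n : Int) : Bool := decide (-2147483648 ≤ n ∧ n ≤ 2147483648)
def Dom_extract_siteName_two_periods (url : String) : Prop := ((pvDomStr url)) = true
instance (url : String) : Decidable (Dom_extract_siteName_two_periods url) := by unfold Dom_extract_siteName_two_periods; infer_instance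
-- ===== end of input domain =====

-- B replaces A's char-by-char state machine (periodCount/lastChar bookkeeping plus a second scan of temp)
-- by direct index computations: two str.find calls, one bounded str.rfind and a single guarded slice
-- (objective: faster — a timing run measured a constant-factor speedup; same O(n) asymptotics).

-- ===== PORT A =====
-- Part 1 of A: the for-loop over url's characters; state (temp, start, end, i, periodCount, lastChar).
-- Python's initial lastChar is the empty string '' (never equal to '/'), afterwards a 1-char string:
-- ported as Option Char, none standing for ''.
def pvLoop1A (url : String) : List Char → String → Int → Int → Int → Int → Option Char → String
  | [], temp, _, _, _, _, _ => temp
  | c :: rest, temp, start, end_, i, pc, lastChar =>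
    let start := if c == '/' && lastChar == some '/' then i + 1 else start
    let pc' := if c == '.' then pc + 1 else pc
    let end_ := if c == '.' && pc' == 2 then i else end_
    if end_ > 0 then PySem.Str.slice url (some start) (some end_)   -- temp = url[start:end]; break
    else pvLoop1A url rest temp start end_ (i + 1) pc' (some c)

-- Part 2 of A: scan temp, remember the slice after every '.'; state (n, match).
def pvLoop2A (temp : String) : List Char → Int → String → String
  | [], _, m => m
  | c :: rest, n, m =>
    let m := if c == '.' then PySem.Str.slice temp (some (n + 1)) none else m   -- match = temp[n+1:]
    pvLoop2A temp rest (n + 1) m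

def extract_siteName_two_periods (url : String) : String :=
  let temp := pvLoop1A url url.toList "" 0 0 0 0 none
  pvLoop2A temp temp.toList 0 ""

-- ===== PORT B =====
def extract_siteName_two_periods_alt (url : String) : String :=
  let first := PySem.Str.find url "."
  if first == -1 then ""
  else
    let end_ := PySem.Str.findFrom url "." (first + 1)
    if end_ == -1 then ""
    else
      let j := PySem.Str.rfindFrom url "//" 0 (some end_)
      let start : Int := if j == -1 then 0 else j + 2
      if start ≤ first then PySem.Str.slice url (some (first + 1)) (some end_) else ""

-- ===== PRECONDITION & SPEC =====
def Spec_extract_siteName_two_periods (url : String) (out : String) : Prop := out = extract_siteName_two_periods_alt url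
instance (url : String) (out : String) : Decidable (Spec_extract_siteName_two_periods url out) := by unfold Spec_extract_siteName_two_periods; infer_instance

-- ===== CLAIM (what is proved, stated in full; the proofs are below) =====
def Claim_equal_extract_siteName_two_periods : Prop := ∀ (url : String), Dom_extract_siteName_two_periods url → Spec_extract_siteName_two_periods url (extract_siteName_two_periods url)

-- ===== LEMMAS AND PROOFS =====

/-- No '.' occurs in the list. -/
def pvNoDot (l : List Char) : Prop := ∀ c ∈ l, c ≠ '.'

/-- Index of the last `j` with `l[j] = '/'` and `l[j+1] = '/'` (A's "start" bookkeeping). -/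
def pvDDLast : List Char → Option Nat
  | a :: b :: t =>
    match pvDDLast (b :: t) with
    | some k => some (k + 1)
    | none => if a = '/' ∧ b = '/' then some 0 else none
  | _ => none

/-- The "start" value A's loop has accumulated after consuming `l`. -/
def pvStartI (l : List Char) : Int :=
  (pvDDLast l).elim 0 (fun j => (j : Int) + 2)

/-- Index of the last '.' in the list (what A's Part 2 looks for). -/
def pvDotLast : List Char → Option Nat
  | [] => none
  | a :: t =>
    match pvDotLast t with
    | some k => some (k + 1)
    | none => if a = '.' then some 0 else none

/-- The value of `temp` after A's Part 1. -/
def pvTemp (url : String) : String :=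
  (((List.findIdx? (· == '.') url.toList).bind fun f =>
    (List.findIdx? (· == '.') (url.toList.drop (f + 1))).map fun k =>
      PySem.Str.slice url (some (pvStartI (url.toList.take (f + 1 + k))))
        (some ((f : Int) + 1 + (k : Int)))).getD "")

lemma pv_findIdx_noDot (l : List Char) (h : pvNoDot l) : List.findIdx? (· == '.') l = none := by
  induction l with
  | nil => rfl
  | cons a t ih =>
    rw [List.findIdx?_cons]
    have ha : ¬ (a = '.') := h a List.mem_cons_self
    simp [ha, ih (fun c hc => h c (List.mem_cons_of_mem _ hc))]

lemma pv_findIdx_first (P R : List Char) (h : pvNoDot P) :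
    List.findIdx? (· == '.') (P ++ '.' :: R) = some P.length := by
  induction P with
  | nil => simp [List.findIdx?_cons]
  | cons a t ih =>
    rw [List.cons_append, List.findIdx?_cons]
    have ha : ¬ (a = '.') := h a List.mem_cons_self
    simp [ha, ih (fun c hc => h c (List.mem_cons_of_mem _ hc))]

lemma pv_first_dot_cases (l : List Char) :
    pvNoDot l ∨ ∃ P R, l = P ++ '.' :: R ∧ pvNoDot P := by
  induction l with
  | nil => exact Or.inl (by intro c hc; cases hc)
  | cons a t ih =>
    by_cases ha : a = '.'
    · exact Or.inr ⟨[], t, by simp [ha], by intro c hc; cases hc⟩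
    · rcases ih with hnd | ⟨P, R, hl, hP⟩
      · refine Or.inl ?_
        intro c hc
        rcases List.mem_cons.1 hc with rfl | hc
        · exact ha
        · exact hnd c hc
      · refine Or.inr ⟨a :: P, R, by simp [hl], ?_⟩
        intro c hc
        rcases List.mem_cons.1 hc with rfl | hc
        · exact ha
        · exact hP c hc

lemma pv_drop_after (P R : List Char) (x : Char) : (P ++ x :: R).drop (P.length + 1) = R := by
  rw [show P ++ x :: R = (P ++ [x]) ++ R by simp]
  rw [List.drop_left' (by simp)]

lemma pv_take_two (P Q S : List Char) :
    (P ++ '.' :: (Q ++ '.' :: S)).take (P.length + 1 + Q.length) = P ++ '.' :: Q := by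
  rw [show P ++ '.' :: (Q ++ '.' :: S) = (P ++ '.' :: Q) ++ '.' :: S by simp]
  rw [List.take_left' (by simp only [List.length_append, List.length_cons]; omega)]

lemma pvDDLast_lt (l : List Char) (j : Nat) (h : pvDDLast l = some j) : j + 1 < l.length := by
  induction l generalizing j with
  | nil => simp [pvDDLast] at h
  | cons a t ih =>
    cases t with
    | nil => simp [pvDDLast] at h
    | cons b t' =>
      rw [pvDDLast] at h
      cases hdd : pvDDLast (b :: t') with
      | some k =>
        rw [hdd] at h
        obtain rfl : k + 1 = j := by simpa using h
        have := ih k hdd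
        simp at this ⊢
        omega
      | none =>
        rw [hdd] at h
        by_cases hab : a = '/' ∧ b = '/'
        · simp only [hab] at h
          obtain rfl : (0 : Nat) = j := by simpa using h
          simp
        · simp [hab] at h

lemma pvDDLast_append (xs : List Char) (c : Char) :
    pvDDLast (xs ++ [c]) =
      if xs.getLast? = some '/' ∧ c = '/' then some (xs.length - 1) else pvDDLast xs := by
  induction xs with
  | nil => simp [pvDDLast]
  | cons a t ih =>
    cases t with
    | nil =>
      by_cases hac : a = '/' ∧ c = '/' <;> simp [pvDDLast, hac]
    | cons b t' =>
      have hg : (a :: b :: t').getLast? = (b :: t').getLast? := List.getLast?_cons_cons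
      rw [hg]
      by_cases hc : (b :: t').getLast? = some '/' ∧ c = '/'
      · rw [if_pos hc]
        have hbt : pvDDLast ((b :: t') ++ [c]) = some ((b :: t').length - 1) := by
          rw [ih, if_pos hc]
        rw [show (a :: b :: t') ++ [c] = a :: b :: (t' ++ [c]) by simp]
        rw [pvDDLast]
        rw [show b :: (t' ++ [c]) = (b :: t') ++ [c] by simp, hbt]
        simp
      · rw [if_neg hc]
        have hbt : pvDDLast ((b :: t') ++ [c]) = pvDDLast (b :: t') := by
          rw [ih, if_neg hc]
        rw [show (a :: b :: t') ++ [c] = a :: b :: (t' ++ [c]) by simp]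
        rw [pvDDLast]
        rw [show b :: (t' ++ [c]) = (b :: t') ++ [c] by simp, hbt]
        rw [pvDDLast]

lemma pvStartI_append (xs : List Char) (c : Char) :
    pvStartI (xs ++ [c]) =
      if xs.getLast? = some '/' ∧ c = '/' then (xs.length : Int) + 1 else pvStartI xs := by
  unfold pvStartI
  rw [pvDDLast_append]
  by_cases h : xs.getLast? = some '/' ∧ c = '/'
  · rw [if_pos h, if_pos h]
    have hne : xs ≠ [] := by
      intro hx; rw [hx] at h; simp at h
    have hlen : 1 ≤ xs.length := by
      cases xs with
      | nil => exact absurd rfl hne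
      | cons _ _ => simp
    simp only [Option.elim_some]
    omega
  · rw [if_neg h, if_neg h]

lemma pv_isPrefixOf_dot (a : Char) (t : List Char) (ha : ¬ (a = '.')) :
    (['.'].isPrefixOf (a :: t)) = false := by
  have ha' : ¬ ('.' = a) := fun he => ha he.symm
  simp [List.isPrefixOf, ha']

lemma pv_isPrefixOf_slash2 (a b : Char) (t : List Char) :
    ['/', '/'].isPrefixOf (a :: b :: t) = (decide (a = '/') && decide (b = '/')) := by
  by_cases h1 : a = '/'
  · subst h1
    by_cases h2 : b = '/'
    · subst h2
      simp [List.isPrefixOf]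
    · simp [List.isPrefixOf, h2, Ne.symm h2]
  · by_cases h2 : b = '/'
    · subst h2
      simp [List.isPrefixOf, h1, Ne.symm h1]
    · simp [List.isPrefixOf, h1, h2, Ne.symm h1, Ne.symm h2]

lemma pv_find_go_noDot (l : List Char) (k : Nat) (h : pvNoDot l) :
    PySem.Chars.find.go ['.'] l k = -1 := by
  induction l generalizing k with
  | nil => rw [PySem.Chars.find.go]; simp
  | cons a t ih =>
    rw [PySem.Chars.find.go, pv_isPrefixOf_dot a t (h a List.mem_cons_self)]
    simp only [Bool.false_eq_true, if_false]
    exact ih (k + 1) (fun c hc => h c (List.mem_cons_of_mem _ hc))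

lemma pv_find_go_first (P R : List Char) (k : Nat) (h : pvNoDot P) :
    PySem.Chars.find.go ['.'] (P ++ '.' :: R) k = ((k + P.length : Nat) : Int) := by
  induction P generalizing k with
  | nil =>
    rw [List.nil_append, PySem.Chars.find.go]
    simp [List.isPrefixOf]
  | cons a t ih =>
    rw [List.cons_append, PySem.Chars.find.go,
      pv_isPrefixOf_dot a _ (h a List.mem_cons_self)]
    simp only [Bool.false_eq_true, if_false]
    rw [ih (k + 1) (fun c hc => h c (List.mem_cons_of_mem _ hc))]
    simp only [List.length_cons]
    omega

lemma pv_find_noDot (l : List Char) (h : pvNoDot l) : PySem.Chars.find l ['.'] = -1 := by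
  rw [PySem.Chars.find]; exact pv_find_go_noDot l 0 h

lemma pv_find_first (P R : List Char) (h : pvNoDot P) :
    PySem.Chars.find (P ++ '.' :: R) ['.'] = (P.length : Int) := by
  rw [PySem.Chars.find, pv_find_go_first P R 0 h]
  simp

lemma pv_prefixOf_len2 (m : List Char) (h : ['/', '/'].isPrefixOf m = true) : 2 ≤ m.length := by
  cases m with
  | nil => simp [List.isPrefixOf] at h
  | cons a t =>
    cases t with
    | nil => simp [List.isPrefixOf] at h
    | cons b t' => simp

lemma pv_rfind_go_eq (l : List Char) (j : Nat) :
    PySem.Chars.rfind.go l ['/', '/'] j =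
      (pvDDLast (l.take (j + 2))).elim (-1) (fun i => (i : Int)) := by
  induction j with
  | zero =>
    rw [PySem.Chars.rfind.go]
    cases l with
    | nil => simp [List.isPrefixOf, pvDDLast]
    | cons a t =>
      cases t with
      | nil => simp [List.isPrefixOf, pvDDLast]
      | cons b t' =>
        rw [pv_isPrefixOf_slash2]
        by_cases h1 : a = '/' <;> by_cases h2 : b = '/' <;>
          simp [pvDDLast, h1, h2]
  | succ j ih =>
    rw [PySem.Chars.rfind.go]
    by_cases hlen : l.length ≤ j + 2
    · have htake3 : l.take (j + 1 + 2) = l := List.take_of_length_le (by omega)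
      have htake2 : l.take (j + 2) = l := List.take_of_length_le hlen
      have hpre : ¬ (['/', '/'].isPrefixOf (l.drop (j + 1)) = true) := by
        intro hh
        have := pv_prefixOf_len2 _ hh
        simp at this
        omega
      rw [if_neg hpre, ih, htake2, htake3]
    · have h2 : j + 2 < l.length := by omega
      have h1 : j + 1 < l.length := by omega
      have htake : l.take (j + 1 + 2) = l.take (j + 2) ++ [l[j + 2]] := by
        rw [show j + 1 + 2 = (j + 2) + 1 by omega, List.take_add_one]
        simp [List.getElem?_eq_getElem h2]
      have hlt : (l.take (j + 2)).length = j + 2 := by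
        simp only [List.length_take]
        omega
      have hlast : (l.take (j + 2)).getLast? = some l[j + 1] := by
        rw [List.getLast?_eq_getElem?, hlt]
        simp [List.getElem?_eq_getElem h1]
      have hdropc : l.drop (j + 1) = l[j + 1] :: l[j + 2] :: l.drop (j + 3) := by
        have e1 : l.drop (j + 1) = l[j + 1] :: l.drop (j + 2) :=
          List.drop_eq_getElem_cons h1
        have e2 : l.drop (j + 2) = l[j + 2] :: l.drop (j + 3) :=
          List.drop_eq_getElem_cons h2
        rw [e1, e2]
      have hpreval : ['/', '/'].isPrefixOf (l.drop (j + 1)) =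
          (decide (l[j + 1] = '/') && decide (l[j + 2] = '/')) := by
        rw [hdropc, pv_isPrefixOf_slash2]
      rw [htake, pvDDLast_append, hlast, hpreval]
      by_cases hc : l[j + 1] = '/' ∧ l[j + 2] = '/'
      · have hp : (decide (l[j + 1] = '/') && decide (l[j + 2] = '/')) = true := by
          simp [hc.1, hc.2]
        rw [hp, if_pos rfl]
        rw [if_pos (⟨by rw [hc.1], hc.2⟩ : some l[j + 1] = some '/' ∧ l[j + 2] = '/')]
        rw [hlt]
        simp only [Option.elim_some]
        omega
      · have hp : (decide (l[j + 1] = '/') && decide (l[j + 2] = '/')) = false := by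
          rcases not_and_or.1 hc with hx | hx <;> simp [hx]
        rw [hp]
        simp only [Bool.false_eq_true, if_false]
        have hne : ¬ (some l[j + 1] = some '/' ∧ l[j + 2] = '/') := by
          intro hu
          exact hc ⟨by injection hu.1, hu.2⟩
        rw [if_neg hne, ih]

lemma pv_rfind_eq (l : List Char) :
    PySem.Chars.rfind l ['/', '/'] =
      (pvDDLast l).elim (-1) (fun i => (i : Int)) := by
  rw [PySem.Chars.rfind, pv_rfind_go_eq]
  rw [List.take_of_length_le (by omega)]

lemma pv_rfindFrom_take (l : List Char) (e : Nat) (he : e ≤ l.length) :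
    PySem.Chars.rfindFrom l ['/', '/'] 0 (some (e : Int)) =
      (pvDDLast (l.take e)).elim (-1) (fun i => (i : Int)) := by
  have h1 : ¬ ((l.length : Int) < (e : Int)) := by omega
  have h2 : ¬ ((e : Int) < 0) := by omega
  simp only [PySem.Chars.rfindFrom, h1, if_false, h2,
    if_neg (by omega : ¬ ((0 : Int)) < 0)]
  simp only [Int.toNat_natCast, Int.toNat_zero, List.drop_zero]
  rw [pv_rfind_eq]
  cases hdd : pvDDLast (l.take e) with
  | none => simp
  | some i =>
    have hne : ((i : Int)) ≠ -1 := by omega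
    simp [hne]

lemma pvDotLast_noDot (l : List Char) (h : pvNoDot l) : pvDotLast l = none := by
  induction l with
  | nil => rfl
  | cons a t ih =>
    rw [pvDotLast, ih (fun c hc => h c (List.mem_cons_of_mem _ hc))]
    simp [h a List.mem_cons_self]

lemma pvDotLast_app (xs ys : List Char) (h : pvNoDot ys) :
    pvDotLast (xs ++ '.' :: ys) = some xs.length := by
  induction xs with
  | nil =>
    rw [List.nil_append, pvDotLast, pvDotLast_noDot ys h]
    simp
  | cons a t ih =>
    rw [List.cons_append, pvDotLast, ih]
    simp

lemma pvLoop2A_inv (temp : String) (l : List Char) :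
    ∀ (n : Nat) (m : String),
      pvLoop2A temp l (n : Int) m =
        (pvDotLast l).elim m
          (fun k => PySem.Str.slice temp (some (((n + k : Nat) : Int) + 1)) none) := by
  induction l with
  | nil => intro n m; rfl
  | cons c t ih =>
    intro n m
    rw [pvLoop2A]
    have hcast : ((n : Int) + 1) = ((n + 1 : Nat) : Int) := by push_cast; ring
    rw [hcast, ih (n + 1)]
    by_cases hc : c = '.'
    · simp only [hc, beq_self_eq_true, if_true, pvDotLast]
      cases hdl : pvDotLast t with
      | some k =>
        simp only [Option.elim_some]
        congr 2
        push_cast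
        ring
      | none => simp
    · have hcb : (c == '.') = false := by simp [hc]
      simp only [hcb, Bool.false_eq_true, if_false, pvDotLast]
      cases hdl : pvDotLast t with
      | some k =>
        simp only [Option.elim_some]
        congr 2
        push_cast
        ring
      | none => simp [hc]

lemma pvLoop1A_inv (rest : List Char) :
    ∀ (pre : List Char) (url : String) (pc : Int),
      url.toList = pre ++ rest →
      ((pc = 0 ∧ pvNoDot pre) ∨
        (pc = 1 ∧ ∃ P Q, pre = P ++ '.' :: Q ∧ pvNoDot P ∧ pvNoDot Q)) →
      pvLoop1A url rest "" (pvStartI pre) 0 (pre.length : Int) pc pre.getLast? = pvTemp url := by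
  induction rest with
  | nil =>
    intro pre url pc h hH
    rw [List.append_nil] at h
    rw [pvLoop1A, pvTemp]
    rcases hH with ⟨_, hnd⟩ | ⟨_, P, Q, hpre, hP, hQ⟩
    · rw [h, pv_findIdx_noDot pre hnd]
      rfl
    · rw [h, hpre, pv_findIdx_first P Q hP]
      simp only [Option.bind_some]
      rw [pv_drop_after, pv_findIdx_noDot Q hQ]
      rfl
  | cons c rest' ih =>
    intro pre url pc h hH
    simp only [pvLoop1A]
    have hstart :
        (if (c == '/' && pre.getLast? == some '/') = true then (pre.length : Int) + 1
          else pvStartI pre) = pvStartI (pre ++ [c]) := by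
      rw [pvStartI_append]
      by_cases h1 : c = '/' <;> by_cases h2 : pre.getLast? = some '/' <;>
        simp [h1, h2]
    by_cases hc : c = '.'
    · subst hc
      rcases hH with ⟨hpc, hnd⟩ | ⟨hpc, P, Q, hpre, hP, hQ⟩
      · -- first '.' seen: continue with pc = 1
        subst hpc
        have hb1 : (('.' : Char) == '/') = false := by decide
        have hb2 : (('.' : Char) == '.') = true := by decide
        simp only [hb1, Bool.false_and, Bool.false_eq_true, if_false, hb2, if_true]
        norm_num
        have h' : url.toList = (pre ++ ['.']) ++ rest' := by rw [h]; simp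
        have hIH := ih (pre ++ ['.']) url 1 h'
          (Or.inr ⟨rfl, pre, [], by simp, hnd, by intro x hx; cases hx⟩)
        have hst : pvStartI (pre ++ ['.']) = pvStartI pre := by
          rw [pvStartI_append]; simp
        rw [hst] at hIH
        have hlen : (((pre ++ ['.']).length : Nat) : Int) = (pre.length : Int) + 1 := by
          simp
        rw [hlen, List.getLast?_concat] at hIH
        exact hIH
      · -- second '.': break, temp = url[start:end]
        subst hpc
        have hb1 : (('.' : Char) == '/') = false := by decide
        have hb2 : (('.' : Char) == '.') = true := by decide
        have hb3 : ((1 : Int) + 1 == 2) = true := by decide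
        simp only [hb1, Bool.false_and, Bool.false_eq_true, if_false, hb2, if_true, hb3,
          Bool.and_self]
        have hpos : (0 : Int) < (pre.length : Int) := by
          rw [hpre]
          simp only [List.length_append, List.length_cons]
          omega
        rw [if_pos hpos]
        have hcs : url.toList = P ++ '.' :: (Q ++ '.' :: rest') := by
          rw [h, hpre]; simp
        rw [pvTemp, hcs, pv_findIdx_first P (Q ++ '.' :: rest') hP]
        simp only [Option.bind_some]
        rw [pv_drop_after, pv_findIdx_first Q rest' hQ]
        simp only [Option.map_some, Option.getD_some]
        rw [pv_take_two, ← hpre]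
        have hplen : ((pre.length : Nat) : Int) = (P.length : Int) + 1 + (Q.length : Int) := by
          rw [hpre]
          simp only [List.length_append, List.length_cons]
          push_cast
          ring
        rw [hplen]
    · have hcb : (c == '.') = false := by simp [hc]
      simp only [hcb, Bool.false_eq_true, if_false]
      rw [hstart]
      have h' : url.toList = (pre ++ [c]) ++ rest' := by rw [h]; simp
      have hH' : ((pc = 0 ∧ pvNoDot (pre ++ [c])) ∨
          (pc = 1 ∧ ∃ P Q, pre ++ [c] = P ++ '.' :: Q ∧ pvNoDot P ∧ pvNoDot Q)) := by
        rcases hH with ⟨hpc, hnd⟩ | ⟨hpc, P, Q, hpre, hP, hQ⟩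
        · refine Or.inl ⟨hpc, ?_⟩
          intro x hx
          rcases List.mem_append.1 hx with hx | hx
          · exact hnd x hx
          · rcases List.mem_singleton.1 hx with rfl
            exact hc
        · refine Or.inr ⟨hpc, P, Q ++ [c], by rw [hpre]; simp, hP, ?_⟩
          intro x hx
          rcases List.mem_append.1 hx with hx | hx
          · exact hQ x hx
          · rcases List.mem_singleton.1 hx with rfl
            exact hc
      have hIH := ih (pre ++ [c]) url pc h' hH'
      have hlen : (((pre ++ [c]).length : Nat) : Int) = (pre.length : Int) + 1 := by simp
      rw [hlen, List.getLast?_concat] at hIH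
      exact hIH

lemma pvA_eq (url : String) :
    extract_siteName_two_periods url = pvLoop2A (pvTemp url) (pvTemp url).toList 0 "" := by
  unfold extract_siteName_two_periods
  have h0 := pvLoop1A_inv url.toList [] url 0 (by simp)
    (Or.inl ⟨rfl, by intro c hc; cases hc⟩)
  simp only [pvStartI, pvDDLast, Option.elim_none, List.length_nil, Nat.cast_zero,
    List.getLast?_nil] at h0
  rw [h0]

lemma pvTemp_noDot (url : String) (h : pvNoDot url.toList) : pvTemp url = "" := by
  rw [pvTemp, pv_findIdx_noDot _ h]
  rfl

lemma pvTemp_one (url : String) (P R : List Char) (h : url.toList = P ++ '.' :: R)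
    (hP : pvNoDot P) (hR : pvNoDot R) : pvTemp url = "" := by
  rw [pvTemp, h, pv_findIdx_first P R hP]
  simp only [Option.bind_some]
  rw [pv_drop_after, pv_findIdx_noDot R hR]
  rfl

lemma pvTemp_two (url : String) (P Q S : List Char)
    (h : url.toList = P ++ '.' :: (Q ++ '.' :: S)) (hP : pvNoDot P) (hQ : pvNoDot Q) :
    pvTemp url = PySem.Str.slice url (some (pvStartI (P ++ '.' :: Q)))
      (some ((P.length : Int) + 1 + (Q.length : Int))) := by
  rw [pvTemp, h, pv_findIdx_first P (Q ++ '.' :: S) hP]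
  simp only [Option.bind_some]
  rw [pv_drop_after, pv_findIdx_first Q S hQ]
  simp only [Option.map_some, Option.getD_some]
  rw [pv_take_two]

lemma pvA_empty_temp (url : String) (h : pvTemp url = "") :
    extract_siteName_two_periods url = "" := by
  rw [pvA_eq, h]
  rfl

lemma pvAlt_noDot (url : String) (h : pvNoDot url.toList) :
    extract_siteName_two_periods_alt url = "" := by
  unfold extract_siteName_two_periods_alt
  have hf : PySem.Chars.find url.toList ['.'] = -1 := pv_find_noDot _ h
  simp [hf]

lemma pvAlt_one (url : String) (P R : List Char) (h : url.toList = P ++ '.' :: R)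
    (hP : pvNoDot P) (hR : pvNoDot R) : extract_siteName_two_periods_alt url = "" := by
  unfold extract_siteName_two_periods_alt
  have hf : PySem.Chars.find url.toList ['.'] = (P.length : Int) := by
    rw [h]; exact pv_find_first P R hP
  have hne : ((P.length : Int)) ≠ -1 := by omega
  have hff : PySem.Chars.findFrom url.toList ['.'] ((P.length : Int) + 1) none = -1 := by
    have hcast : ((P.length : Int) + 1) = ((P.length + 1 : Nat) : Int) := by push_cast; ring
    rw [hcast, PySem.Chars.findFrom_natCast url.toList ['.'] (P.length + 1)
      (by rw [h]; simp)]
    rw [h, pv_drop_after, pv_find_noDot R hR]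
    simp
  simp [hf, hne, hff]

lemma pvAlt_two (url : String) (P Q S : List Char)
    (h : url.toList = P ++ '.' :: (Q ++ '.' :: S)) (hP : pvNoDot P) (hQ : pvNoDot Q) :
    extract_siteName_two_periods_alt url =
      if pvStartI (P ++ '.' :: Q) ≤ (P.length : Int)
      then PySem.Str.slice url (some ((P.length : Int) + 1))
        (some ((P.length : Int) + 1 + (Q.length : Int)))
      else "" := by
  unfold extract_siteName_two_periods_alt
  have hf : PySem.Chars.find url.toList ['.'] = (P.length : Int) := by
    rw [h]; exact pv_find_first P (Q ++ '.' :: S) hP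
  have hne : ((P.length : Int)) ≠ -1 := by omega
  have hff : PySem.Chars.findFrom url.toList ['.'] ((P.length : Int) + 1) none =
      (P.length : Int) + 1 + (Q.length : Int) := by
    have hcast : ((P.length : Int) + 1) = ((P.length + 1 : Nat) : Int) := by push_cast; ring
    rw [hcast, PySem.Chars.findFrom_natCast url.toList ['.'] (P.length + 1)
      (by rw [h]; simp)]
    rw [h, pv_drop_after, pv_find_first Q S hQ]
    have hne2 : ((Q.length : Int)) ≠ -1 := by omega
    rw [if_neg hne2]
  have hne3 : (((P.length : Int) + 1 + (Q.length : Int))) ≠ -1 := by omega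
  have hrf : PySem.Chars.rfindFrom url.toList ['/', '/'] 0
      (some ((P.length : Int) + 1 + (Q.length : Int))) =
      (pvDDLast (P ++ '.' :: Q)).elim (-1) (fun i => (i : Int)) := by
    have hcst : ((P.length : Int) + 1 + (Q.length : Int)) =
        ((P.length + 1 + Q.length : Nat) : Int) := by push_cast; ring
    rw [hcst, pv_rfindFrom_take url.toList (P.length + 1 + Q.length)
      (by rw [h]; simp only [List.length_append, List.length_cons]; omega)]
    rw [h, pv_take_two]
  cases hdd : pvDDLast (P ++ '.' :: Q) with
  | none =>
    rw [hdd] at hrf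
    simp only [Option.elim_none] at hrf
    have hs : pvStartI (P ++ '.' :: Q) = 0 := by rw [pvStartI, hdd]; rfl
    rw [hs]
    have h0 : (0 : Int) ≤ (P.length : Int) := by omega
    simp [hf, hne, hff, hne3, hrf, h0]
  | some j =>
    rw [hdd] at hrf
    simp only [Option.elim_some] at hrf
    have hnej : ((j : Int)) ≠ -1 := by omega
    have hs : pvStartI (P ++ '.' :: Q) = (j : Int) + 2 := by rw [pvStartI, hdd]; rfl
    rw [hs]
    simp [hf, hne, hff, hne3, hrf, hnej]

lemma pvTempList_two (url : String) (P Q S : List Char)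
    (h : url.toList = P ++ '.' :: (Q ++ '.' :: S)) (hP : pvNoDot P) (hQ : pvNoDot Q)
    (sN : Nat) (hsI : pvStartI (P ++ '.' :: Q) = (sN : Int))
    (hsN : sN ≤ P.length + 1 + Q.length) :
    (pvTemp url).toList = (P ++ '.' :: Q).drop sN := by
  rw [pvTemp_two url P Q S h hP hQ, hsI]
  have hcast : ((P.length : Int) + 1 + (Q.length : Int)) =
      ((P.length + 1 + Q.length : Nat) : Int) := by push_cast; ring
  rw [hcast]
  have hb : (PySem.Str.slice url (some (sN : Int))
      (some ((P.length + 1 + Q.length : Nat) : Int))).toList =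
      PySem.List.slice url.toList (some (sN : Int))
        (some ((P.length + 1 + Q.length : Nat) : Int)) := by
    simp
  rw [hb, PySem.List.slice_natCast, h]
  rw [show P ++ '.' :: (Q ++ '.' :: S) = (P ++ '.' :: Q) ++ '.' :: S by simp]
  rw [List.drop_append_of_le_length
    (by simp only [List.length_append, List.length_cons]; omega)]
  rw [List.take_append_of_le_length
    (by simp only [List.length_drop, List.length_append, List.length_cons]; omega)]
  rw [List.take_of_length_le
    (by simp only [List.length_drop, List.length_append, List.length_cons]; omega)]

lemma pvA_two (url : String) (P Q S : List Char)
    (h : url.toList = P ++ '.' :: (Q ++ '.' :: S)) (hP : pvNoDot P) (hQ : pvNoDot Q) :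
    extract_siteName_two_periods url =
      if pvStartI (P ++ '.' :: Q) ≤ (P.length : Int)
      then PySem.Str.slice url (some ((P.length : Int) + 1))
        (some ((P.length : Int) + 1 + (Q.length : Int)))
      else "" := by
  obtain ⟨sN, hsI, hsN⟩ :
      ∃ sN : Nat, pvStartI (P ++ '.' :: Q) = (sN : Int) ∧ sN ≤ P.length + 1 + Q.length := by
    cases hdd : pvDDLast (P ++ '.' :: Q) with
    | none => exact ⟨0, by rw [pvStartI, hdd]; rfl, by omega⟩
    | some j =>
      have hlt := pvDDLast_lt _ _ hdd
      simp only [List.length_append, List.length_cons] at hlt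
      refine ⟨j + 2, by rw [pvStartI, hdd]; simp only [Option.elim_some]; push_cast; ring,
        by omega⟩
  have htl := pvTempList_two url P Q S h hP hQ sN hsI hsN
  rw [pvA_eq, htl]
  have hinv := pvLoop2A_inv (pvTemp url) ((P ++ '.' :: Q).drop sN) 0 ""
  rw [show ((0 : Nat) : Int) = (0 : Int) by simp] at hinv
  rw [hinv]
  by_cases hle : sN ≤ P.length
  · -- the first '.' survives in temp at position P.length - sN
    have hdrop : (P ++ '.' :: Q).drop sN = P.drop sN ++ '.' :: Q :=
      List.drop_append_of_le_length hle
    have hdl : pvDotLast ((P ++ '.' :: Q).drop sN) = some (P.length - sN) := by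
      rw [hdrop, pvDotLast_app _ _ hQ, List.length_drop]
    rw [hdl]
    simp only [Option.elim_some]
    have hcond : pvStartI (P ++ '.' :: Q) ≤ (P.length : Int) := by
      rw [hsI]; omega
    rw [if_pos hcond]
    have hLHS : (PySem.Str.slice (pvTemp url)
        (some (((0 + (P.length - sN) : Nat) : Int) + 1)) none).toList = Q := by
      have hb : (PySem.Str.slice (pvTemp url)
          (some (((0 + (P.length - sN) : Nat) : Int) + 1)) none).toList =
          PySem.List.slice (pvTemp url).toList
            (some (((0 + (P.length - sN) : Nat) : Int) + 1)) none := by simp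
      rw [hb]
      have hcast : (((0 + (P.length - sN) : Nat) : Int) + 1) =
          ((P.length - sN + 1 : Nat) : Int) := by push_cast; ring
      rw [hcast, PySem.List.slice_from_natCast, htl, hdrop]
      rw [show P.drop sN ++ '.' :: Q = (P.drop sN ++ ['.']) ++ Q by simp]
      rw [List.drop_left' (by
        simp only [List.length_append, List.length_drop, List.length_cons,
          List.length_nil])]
    have hRHS : (PySem.Str.slice url (some ((P.length : Int) + 1))
        (some ((P.length : Int) + 1 + (Q.length : Int)))).toList = Q := by
      have hb : (PySem.Str.slice url (some ((P.length : Int) + 1))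
          (some ((P.length : Int) + 1 + (Q.length : Int)))).toList =
          PySem.List.slice url.toList (some ((P.length : Int) + 1))
            (some ((P.length : Int) + 1 + (Q.length : Int))) := by simp
      rw [hb]
      have hc2 : ((P.length : Int) + 1 + (Q.length : Int)) =
          ((P.length + 1 + Q.length : Nat) : Int) := by push_cast; ring
      have hc1 : ((P.length : Int) + 1) = ((P.length + 1 : Nat) : Int) := by push_cast; ring
      rw [hc2, hc1, PySem.List.slice_natCast, h, pv_drop_after]
      rw [show P.length + 1 + Q.length - (P.length + 1) = Q.length by omega]
      rw [List.take_append_of_le_length (le_refl _), List.take_of_length_le (le_refl _)]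
    simpa [String.ext_iff] using hLHS.trans hRHS.symm
  · -- start is past the first '.': temp has no dot, both sides are ""
    have hlen1 : (P ++ ['.']).length ≤ sN := by
      simp only [List.length_append, List.length_cons, List.length_nil]
      omega
    have hdrop : (P ++ '.' :: Q).drop sN = Q.drop (sN - (P.length + 1)) := by
      rw [show P ++ '.' :: Q = (P ++ ['.']) ++ Q by simp, List.drop_append]
      rw [List.drop_of_length_le hlen1]
      simp
    have hdl : pvDotLast ((P ++ '.' :: Q).drop sN) = none := by
      rw [hdrop]
      exact pvDotLast_noDot _ (fun x hx => hQ x (List.drop_subset _ _ hx))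
    rw [hdl]
    simp only [Option.elim_none]
    have hcond : ¬ (pvStartI (P ++ '.' :: Q) ≤ (P.length : Int)) := by
      rw [hsI]; omega
    rw [if_neg hcond]

-- ===== VERDICT (by name: the statement is the Claim_ definition above) =====
theorem extract_siteName_two_periods_spec : Claim_equal_extract_siteName_two_periods := by
  intro url _
  unfold Spec_extract_siteName_two_periods
  rcases pv_first_dot_cases url.toList with hnd | ⟨P, R, hcs, hP⟩
  · rw [pvA_empty_temp url (pvTemp_noDot url hnd), pvAlt_noDot url hnd]
  · rcases pv_first_dot_cases R with hndR | ⟨Q, S, hR, hQ⟩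
    · rw [pvA_empty_temp url (pvTemp_one url P R hcs hP hndR),
        pvAlt_one url P R hcs hP hndR]
    · subst hR
      rw [pvA_two url P Q S hcs hP hQ, pvAlt_two url P Q S hcs hP hQ]
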